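-- pv_equiv track=rewrite | github.com/inniyah/aiml-chatbot | pos_preproc.py | assign_unk
-- ===== SOURCE A (Python) =====
-- import string
--
-- punct = set(string.punctuation)
--
-- NOUN_SUFFIX = ["action", "age", "ance", "cy", "dom", "ee", "ence", "er", "hood", "ion", "ism", "ist", "ity", "ling", "ment", "ness", "or", "ry", "scape", "ship", "ty"]
--
-- VERB_SUFFIX = ["ate", "ify", "ise", "ize"]
--
-- ADJ_SUFFIX  = ["able", "ese", "ful", "i", "ian", "ible", "ic", "ish", "ive", "less", "ly", "ous"]
--
-- ADV_SUFFIX  = ["ward", "wards", "wise"]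
--
-- def assign_unk(tok):
--     # Digits
--     if any(char.isdigit() for char in tok):
--         return "--unk_digit--"
--
--     # Punctuation
--     elif any(char in punct for char in tok):
--         return "--unk_punct--"
--
--     # Upper-case
--     elif any(char.isupper() for char in tok):
--         return "--unk_upper--"
--
--     # Nouns
--     elif any(tok.endswith(suffix) for suffix in NOUN_SUFFIX):
--         return "--unk_noun--"
--
--     # Verbs
--     elif any(tok.endswith(suffix) for suffix in VERB_SUFFIX):
--         return "--unk_verb--"
--
--     # Adjectives
--     elif any(tok.endswith(suffix) for suffix in ADJ_SUFFIX):
--         return "--unk_adj--"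
--
--     # Adverbs
--     elif any(tok.endswith(suffix) for suffix in ADV_SUFFIX):
--         return "--unk_adv--"
--
--     return "--unk--"
-- ===== SOURCE B (Python) =====
-- import string
--
-- punct = set(string.punctuation)
--
-- NOUN_SUFFIX = ["action", "age", "ance", "cy", "dom", "ee", "ence", "er", "hood", "ion", "ism", "ist", "ity", "ling", "ment", "ness", "or", "ry", "scape", "ship", "ty"]
-- VERB_SUFFIX = ["ate", "ify", "ise", "ize"]
-- ADJ_SUFFIX  = ["able", "ese", "ful", "i", "ian", "ible", "ic", "ish", "ive", "less", "ly", "ous"]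
-- ADV_SUFFIX  = ["ward", "wards", "wise"]
--
-- _SUFFIX_TABLE = [(NOUN_SUFFIX, "--unk_noun--"),
--                  (VERB_SUFFIX, "--unk_verb--"),
--                  (ADJ_SUFFIX,  "--unk_adj--"),
--                  (ADV_SUFFIX,  "--unk_adv--")]
--
-- def assign_unk(tok):
--     # One pass over the characters instead of three separate scans.
--     has_digit = has_punct = has_upper = False
--     for ch in tok:
--         if ch.isdigit():
--             has_digit = True
--         elif ch in punct:
--             has_punct = True
--         elif ch.isupper():
--             has_upper = True
--     if has_digit:
--         return "--unk_digit--"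
--     if has_punct:
--         return "--unk_punct--"
--     if has_upper:
--         return "--unk_upper--"
--     for suffixes, label in _SUFFIX_TABLE:
--         if any(tok.endswith(s) for s in suffixes):
--             return label
--     return "--unk--"
-- ===== Notes on version B (the rewrite author's own statement) =====
-- stated objective: alternative
-- what changed: B replaces A's three separate full-token any() scans by a single character pass accumulating has_digit/has_punct/has_upper flags, and replaces A's four hard-coded suffix elif branches by one loop over a (suffix-list, label) table.
import Mathlib
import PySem

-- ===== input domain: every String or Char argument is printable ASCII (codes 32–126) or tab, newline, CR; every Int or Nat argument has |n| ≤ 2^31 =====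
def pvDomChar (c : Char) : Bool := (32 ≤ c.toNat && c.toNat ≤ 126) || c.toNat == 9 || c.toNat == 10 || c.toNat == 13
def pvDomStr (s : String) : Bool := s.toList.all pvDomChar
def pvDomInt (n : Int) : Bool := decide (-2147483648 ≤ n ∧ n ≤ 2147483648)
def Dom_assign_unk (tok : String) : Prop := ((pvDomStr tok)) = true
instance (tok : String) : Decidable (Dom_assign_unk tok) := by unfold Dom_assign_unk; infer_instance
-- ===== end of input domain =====

-- B differs from A only in structure (one char pass + a suffix table); same return value everywhere.

-- ===== PORT A =====
def punct : PySem.Set Char := PySem.Set.ofList "!\"#$%&'()*+,-./:;<=>?@[\\]^_`{|}~".toList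

def NOUN_SUFFIX : List String := ["action", "age", "ance", "cy", "dom", "ee", "ence", "er", "hood", "ion", "ism", "ist", "ity", "ling", "ment", "ness", "or", "ry", "scape", "ship", "ty"]
def VERB_SUFFIX : List String := ["ate", "ify", "ise", "ize"]
def ADJ_SUFFIX : List String := ["able", "ese", "ful", "i", "ian", "ible", "ic", "ish", "ive", "less", "ly", "ous"]
def ADV_SUFFIX : List String := ["ward", "wards", "wise"]

def assign_unk (tok : String) : String :=
  if tok.toList.any PySem.Chars.isdigit then "--unk_digit--"
  else if tok.toList.any (fun c => punct.contains c) then "--unk_punct--"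
  else if tok.toList.any PySem.Chars.isupper then "--unk_upper--"
  else if NOUN_SUFFIX.any (fun s => PySem.Str.endswith tok s) then "--unk_noun--"
  else if VERB_SUFFIX.any (fun s => PySem.Str.endswith tok s) then "--unk_verb--"
  else if ADJ_SUFFIX.any (fun s => PySem.Str.endswith tok s) then "--unk_adj--"
  else if ADV_SUFFIX.any (fun s => PySem.Str.endswith tok s) then "--unk_adv--"
  else "--unk--"

-- ===== PORT B =====
-- single pass: the for-loop of Source B accumulating (has_digit, has_punct, has_upper)
def scanFlags : List Char → Bool × Bool × Bool → Bool × Bool × Bool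
  | [], acc => acc
  | c :: cs, (d, p, u) =>
    scanFlags cs
      (if PySem.Chars.isdigit c then (true, p, u)
       else if punct.contains c then (d, true, u)
       else if PySem.Chars.isupper c then (d, p, true)
       else (d, p, u))

def suffixTable : List (List String × String) :=
  [(NOUN_SUFFIX, "--unk_noun--"), (VERB_SUFFIX, "--unk_verb--"),
   (ADJ_SUFFIX, "--unk_adj--"), (ADV_SUFFIX, "--unk_adv--")]

def suffixLoop (tok : String) : List (List String × String) → String
  | [] => "--unk--"
  | (sufs, label) :: rest =>
    if sufs.any (fun s => PySem.Str.endswith tok s) then label else suffixLoop tok rest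

def assign_unk_alt (tok : String) : String :=
  let f := scanFlags tok.toList (false, false, false)
  if f.1 then "--unk_digit--"
  else if f.2.1 then "--unk_punct--"
  else if f.2.2 then "--unk_upper--"
  else suffixLoop tok suffixTable

-- ===== PRECONDITION & SPEC =====
def Spec_assign_unk (tok : String) (out : String) : Prop := out = assign_unk_alt tok
instance (tok : String) (out : String) : Decidable (Spec_assign_unk tok out) := by unfold Spec_assign_unk; infer_instance

-- ===== CLAIM (what is proved, stated in full; the proofs are below) =====
def Claim_equal_assign_unk : Prop := ∀ (tok : String), Dom_assign_unk tok → Spec_assign_unk tok (assign_unk tok)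

-- ===== LEMMAS AND PROOFS =====

theorem scanFlags_eq (l : List Char) (d p u : Bool) :
    scanFlags l (d, p, u) =
      (d || l.any PySem.Chars.isdigit,
       p || l.any (fun c => !PySem.Chars.isdigit c && punct.contains c),
       u || l.any (fun c => !PySem.Chars.isdigit c && !punct.contains c && PySem.Chars.isupper c)) := by
  induction l generalizing d p u with
  | nil => simp [scanFlags]
  | cons c cs ih =>
    simp only [scanFlags, List.any_cons]
    cases hd : PySem.Chars.isdigit c <;>
      cases hp : punct.contains c <;>
        cases hu : PySem.Chars.isupper c <;>
          simp [ih]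

theorem any_and_of_none_first (l : List Char) (f g : Char → Bool)
    (h : l.any f = false) : l.any (fun c => !f c && g c) = l.any g := by
  induction l with
  | nil => rfl
  | cons c cs ih =>
    simp only [List.any_cons, Bool.or_eq_false_iff] at h
    simp [List.any_cons, h.1, ih h.2]

-- ===== VERDICT (by name: the statement is the Claim_ definition above) =====
theorem assign_unk_spec : Claim_equal_assign_unk := by
  intro tok _
  unfold Spec_assign_unk assign_unk assign_unk_alt
  rw [scanFlags_eq]
  simp only [Bool.false_or]
  by_cases hd : tok.toList.any PySem.Chars.isdigit = true
  · rw [if_pos hd, if_pos hd]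
  · rw [Bool.not_eq_true] at hd
    rw [show (fun c => !PySem.Chars.isdigit c && !punct.contains c && PySem.Chars.isupper c)
          = (fun c => !PySem.Chars.isdigit c && (!punct.contains c && PySem.Chars.isupper c)) from
        funext fun c => by rw [Bool.and_assoc]]
    rw [any_and_of_none_first _ _ _ hd, any_and_of_none_first _ _ _ hd]
    by_cases hp : tok.toList.any (fun c => punct.contains c) = true
    · have hnd : ¬ (tok.toList.any PySem.Chars.isdigit = true) := by simp [hd]
      rw [if_neg hnd, if_neg hnd, if_pos hp, if_pos hp]
    · rw [Bool.not_eq_true] at hp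
      rw [any_and_of_none_first _ _ _ hp]
      rfl
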